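-- pv_equiv track=rewrite | github.com/Gololobov-Sergey/P51_Python | Lesson 16.py | minSumma
-- ===== SOURCE A (Python) =====
-- def minSumma(list_, index, minIndex, minSum):
--     if index + 10 > len(list_):
--         return minIndex
--
--     currentSum = 0
--     for i in range(10):
--         currentSum += list_[i + index]
--
--     if currentSum < minSum:
--         minIndex = index
--         minSum = currentSum
--
--     return minSumma(list_, index + 1, minIndex, minSum)
-- ===== SOURCE B (Python) =====
-- def minSumma(list_, index, minIndex, minSum):
--     n = len(list_)
--     if index + 10 > n:
--         return minIndex
--     window = 0
--     for i in range(10):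
--         window += list_[i + index]
--     if window < minSum:
--         minIndex, minSum = index, window
--     for s in range(index + 1, n - 9):
--         window += list_[s + 9] - list_[s - 1]
--         if window < minSum:
--             minIndex, minSum = s, window
--     return minIndex
-- ===== Notes on version B (the rewrite author's own statement) =====
-- stated objective: faster
-- what changed: Replaced A's recursion that re-sums every 10-element window from scratch by a single iterative sliding-window pass that updates the running sum in O(1) per step (add the entering element, drop the leaving one).
-- outside the precondition, e.g. on minSumma([1, 2, 3, 4, 5, 6, 7, 8, 9, 10, 11, 12], -20, 0, 100): A raises IndexError, B raises IndexError
import Mathlib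
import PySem

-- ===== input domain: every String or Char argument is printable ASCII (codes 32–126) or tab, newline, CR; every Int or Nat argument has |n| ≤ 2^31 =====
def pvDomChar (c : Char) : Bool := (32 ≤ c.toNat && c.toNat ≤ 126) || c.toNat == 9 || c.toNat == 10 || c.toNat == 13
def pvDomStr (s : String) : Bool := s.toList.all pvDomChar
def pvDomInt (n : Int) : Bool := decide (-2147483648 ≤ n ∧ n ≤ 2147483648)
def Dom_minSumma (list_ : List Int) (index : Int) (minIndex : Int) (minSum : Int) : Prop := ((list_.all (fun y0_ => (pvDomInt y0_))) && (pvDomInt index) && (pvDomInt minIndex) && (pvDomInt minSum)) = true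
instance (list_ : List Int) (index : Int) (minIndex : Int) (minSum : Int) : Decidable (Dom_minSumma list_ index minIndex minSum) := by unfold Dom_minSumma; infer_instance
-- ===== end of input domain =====

-- B replaces A's recursion (re-summing each 10-element window) by one iterative sliding-window
-- pass with an O(1) running-sum update per step; return values agree on all of Pre_.

-- ===== PORT A =====
-- Literal port of A's recursion; list_[i + index] is PySem.List.pyGetD (in range on all of Pre_;
-- the default 0 is only reached outside Pre_, where the Python raises IndexError).
def minSumma (list_ : List Int) (index : Int) (minIndex : Int) (minSum : Int) : Int :=
  if (list_.length : Int) < index + 10 then minIndex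
  else
    let currentSum :=
      (PySem.List.pyRange 0 10 1).foldl
        (fun acc i => acc + PySem.List.pyGetD list_ (i + index) 0) 0
    let p : Int × Int := if currentSum < minSum then (index, currentSum) else (minIndex, minSum)
    minSumma list_ (index + 1) p.1 p.2
termination_by ((list_.length : Int) + 10 - index).toNat
decreasing_by
  rename_i h
  simp only [not_lt] at h
  omega

-- ===== PORT B =====
-- Literal port of Source B: initial 10-element sum, then a fold over range(index+1, n-9)
-- carrying (minIndex, minSum, window) with an O(1) window update.
def minSumma_alt (list_ : List Int) (index : Int) (minIndex : Int) (minSum : Int) : Int :=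
  let n : Int := list_.length
  if n < index + 10 then minIndex
  else
    let window :=
      (PySem.List.pyRange 0 10 1).foldl
        (fun acc i => acc + PySem.List.pyGetD list_ (i + index) 0) 0
    let st0 : Int × Int := if window < minSum then (index, window) else (minIndex, minSum)
    let res :=
      (PySem.List.pyRange (index + 1) (n - 9) 1).foldl
        (fun (st : Int × Int × Int) s =>
          let w := st.2.2 + PySem.List.pyGetD list_ (s + 9) 0 - PySem.List.pyGetD list_ (s - 1) 0
          if w < st.2.1 then (s, w, w) else (st.1, st.2.1, w))
        (st0.1, st0.2, window)
    res.1

-- ===== PRECONDITION & SPEC =====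
-- Pre_ excludes exactly the inputs where A raises IndexError (a start index below -len(list_)
-- while a full 10-element window still fits); B raises IndexError there as well.
def Pre_minSumma (list_ : List Int) (index : Int) (minIndex : Int) (minSum : Int) : Prop :=
  -(list_.length : Int) ≤ index ∨ (list_.length : Int) < index + 10
instance (list_ : List Int) (index : Int) (minIndex : Int) (minSum : Int) : Decidable (Pre_minSumma list_ index minIndex minSum) := by unfold Pre_minSumma; infer_instance

def pvWitness_minSumma : List Int × Int × Int × Int := ([3, 1, 4, 1, 5, 9, 2, 6, 5, 3, 5], 0, -1, 100)

def Spec_minSumma (list_ : List Int) (index : Int) (minIndex : Int) (minSum : Int) (out : Int) : Prop := out = minSumma_alt list_ index minIndex minSum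
instance (list_ : List Int) (index : Int) (minIndex : Int) (minSum : Int) (out : Int) : Decidable (Spec_minSumma list_ index minIndex minSum out) := by unfold Spec_minSumma; infer_instance

-- ===== CLAIM (what is proved, stated in full; the proofs are below) =====
def Claim_equal_minSumma : Prop := ∀ (list_ : List Int) (index : Int) (minIndex : Int) (minSum : Int), Dom_minSumma list_ index minIndex minSum → Pre_minSumma list_ index minIndex minSum → Spec_minSumma list_ index minIndex minSum (minSumma list_ index minIndex minSum)

-- ===== LEMMAS AND PROOFS =====

-- The 10-element window sum both ports compute at start position s.
def pvWin (list_ : List Int) (s : Int) : Int :=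
  (PySem.List.pyRange 0 10 1).foldl
    (fun acc i => acc + PySem.List.pyGetD list_ (i + s) 0) 0

theorem pvWin_slide (list_ : List Int) (s : Int) :
    pvWin list_ (s - 1) + PySem.List.pyGetD list_ (s + 9) 0 - PySem.List.pyGetD list_ (s - 1) 0
      = pvWin list_ s := by
  have h10 : PySem.List.pyRange 0 10 1 = [0, 1, 2, 3, 4, 5, 6, 7, 8, 9] := by decide
  simp only [pvWin, h10, List.foldl]
  ring_nf

theorem pv_loop (list_ : List Int) :
    ∀ (k : Nat) (s mi ms : Int), (list_.length : Int) - 9 - s ≤ k →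
      ((PySem.List.pyRange s ((list_.length : Int) - 9) 1).foldl
        (fun (st : Int × Int × Int) t =>
          let w := st.2.2 + PySem.List.pyGetD list_ (t + 9) 0 - PySem.List.pyGetD list_ (t - 1) 0
          if w < st.2.1 then (t, w, w) else (st.1, st.2.1, st.2.2 + PySem.List.pyGetD list_ (t + 9) 0 - PySem.List.pyGetD list_ (t - 1) 0))
        (mi, ms, pvWin list_ (s - 1))).1 = minSumma list_ s mi ms := by
  intro k
  induction k with
  | zero =>
    intro s mi ms hk
    have hnil : PySem.List.pyRange s ((list_.length : Int) - 9) 1 = [] :=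
      PySem.List.pyRange_one_eq_nil (by omega)
    rw [minSumma, hnil]
    simp only [List.foldl]
    rw [if_pos (by omega)]
  | succ k ih =>
    intro s mi ms hk
    by_cases hs : (list_.length : Int) - 9 ≤ s
    · have hnil : PySem.List.pyRange s ((list_.length : Int) - 9) 1 = [] :=
        PySem.List.pyRange_one_eq_nil hs
      rw [minSumma, hnil]
      simp only [List.foldl]
      rw [if_pos (by omega)]
    · have hlt : s < (list_.length : Int) - 9 := by omega
      rw [PySem.List.pyRange_one_cons hlt]
      rw [minSumma, if_neg (by omega)]
      simp only [List.foldl]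
      rw [pvWin_slide list_ s]
      have hwin : (PySem.List.pyRange 0 10 1).foldl
          (fun acc i => acc + PySem.List.pyGetD list_ (i + s) 0) 0 = pvWin list_ s := rfl
      simp only [hwin]
      by_cases hc : pvWin list_ s < ms
      · rw [if_pos hc]
        have := ih (s + 1) s (pvWin list_ s) (by omega)
        simpa [hc] using this
      · rw [if_neg hc]
        have := ih (s + 1) mi ms (by omega)
        simpa [hc] using this

-- ===== VERDICT (by name: the statement is the Claim_ definition above) =====
theorem minSumma_spec : Claim_equal_minSumma := by
  intro list_ index minIndex minSum _hDom _hPre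
  unfold Spec_minSumma minSumma_alt
  by_cases h : (list_.length : Int) < index + 10
  · rw [minSumma, if_pos h]
    simp only [h, if_pos]
  · simp only [h, if_false]
    rw [minSumma, if_neg h]
    have hwin : (PySem.List.pyRange 0 10 1).foldl
        (fun acc i => acc + PySem.List.pyGetD list_ (i + index) 0) 0 = pvWin list_ index := rfl
    simp only [hwin]
    have hloop := pv_loop list_ ((list_.length : Int) - 9 - (index + 1)).toNat (index + 1)
    by_cases hc : pvWin list_ index < minSum
    · rw [if_pos hc]
      have := hloop index (pvWin list_ index) (by omega)
      simp only [add_sub_cancel_right] at this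
      simpa using this.symm
    · rw [if_neg hc]
      have := hloop minIndex minSum (by omega)
      simp only [add_sub_cancel_right] at this
      simpa using this.symm
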